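-- pv_equiv track=rewrite | github.com/f1sherFM/AirTrace-v2 | application/queries/health.py | _derive_public_health_status
-- ===== SOURCE A (Python) =====
-- from typing import Any
--
-- def _normalize_health_status(value: str) -> str:
--     normalized = (value or "").strip().lower()
--     if normalized in {"healthy", "ok", "up", "enabled", "active"}:
--         return "healthy"
--     if normalized in {"disabled"}:
--         return "degraded"
--     if normalized in {"unhealthy", "down", "error", "failed"}:
--         return "unhealthy"
--     if normalized in {"degraded", "warning", "unknown"}:
--         return "degraded"
--     return "degraded"
--
-- def _derive_public_health_status(normalized_services: dict[str, dict[str, Any]]) -> str: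
--     core_components = (
--         "api",
--         "external_api",
--         "aqi_calculator",
--         "nmu_detector",
--     )
--     statuses = [
--         _normalize_health_status(normalized_services.get(name, {}).get("status", "degraded"))
--         for name in core_components
--     ]
--
--     if any(status == "unhealthy" for status in statuses):
--         return "unhealthy"
--     if any(status == "degraded" for status in statuses):
--         return "degraded"
--     return "healthy"
-- ===== SOURCE B (Python) =====
-- def _normalize_health_status(value: str) -> str:
--     normalized = (value or "").strip().lower()
--     if normalized in {"healthy", "ok", "up", "enabled", "active"}:
--         return "healthy"
--     if normalized in {"disabled"}:
--         return "degraded"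
--     if normalized in {"unhealthy", "down", "error", "failed"}:
--         return "unhealthy"
--     if normalized in {"degraded", "warning", "unknown"}:
--         return "degraded"
--     return "degraded"
--
-- def _severity(status: str) -> int:
--     return 2 if status == "unhealthy" else (1 if status == "degraded" else 0)
--
-- def _derive_public_health_status(normalized_services):
--     worst = 0
--     for name in ("api", "external_api", "aqi_calculator", "nmu_detector"):
--         status = _normalize_health_status(
--             normalized_services.get(name, {}).get("status", "degraded"))
--         worst = max(worst, _severity(status))
--     return "unhealthy" if worst == 2 else ("degraded" if worst == 1 else "healthy")
-- ===== Notes on version B (the rewrite author's own statement) =====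
-- stated objective: alternative
-- what changed: Replaces the intermediate statuses list and the two any() scans by a single pass that keeps a running maximum severity (healthy=0, degraded=1, unhealthy=2) and maps it back to a status string at the end.
import Mathlib
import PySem

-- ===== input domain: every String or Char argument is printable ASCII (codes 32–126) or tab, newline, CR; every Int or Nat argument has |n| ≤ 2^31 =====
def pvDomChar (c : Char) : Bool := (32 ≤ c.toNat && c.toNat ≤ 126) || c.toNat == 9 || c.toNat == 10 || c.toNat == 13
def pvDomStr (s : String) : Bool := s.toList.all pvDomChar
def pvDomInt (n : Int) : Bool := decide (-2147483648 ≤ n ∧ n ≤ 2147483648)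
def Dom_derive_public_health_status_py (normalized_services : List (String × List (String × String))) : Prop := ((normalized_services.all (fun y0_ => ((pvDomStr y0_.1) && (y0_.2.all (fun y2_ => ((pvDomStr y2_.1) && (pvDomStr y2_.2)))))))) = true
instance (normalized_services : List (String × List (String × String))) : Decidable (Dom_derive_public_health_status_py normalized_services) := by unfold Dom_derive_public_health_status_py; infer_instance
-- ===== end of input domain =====

-- B replaces A's intermediate statuses list and two any() scans by a single running-maximum-severity pass (alternative decomposition; same cost).

-- ===== PORT A =====
-- shared helper _normalize_health_status (identical in Source A and Source B)
def normalize_health_status (value : String) : String :=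
  let normalized := PySem.Str.lower (PySem.Str.strip (if value = "" then "" else value))
  if normalized = "healthy" ∨ normalized = "ok" ∨ normalized = "up" ∨ normalized = "enabled" ∨ normalized = "active" then "healthy"
  else if normalized = "disabled" then "degraded"
  else if normalized = "unhealthy" ∨ normalized = "down" ∨ normalized = "error" ∨ normalized = "failed" then "unhealthy"
  else if normalized = "degraded" ∨ normalized = "warning" ∨ normalized = "unknown" then "degraded"
  else "degraded"

def derive_public_health_status_py (normalized_services : List (String × List (String × String))) : String :=
  let core_components := ["api", "external_api", "aqi_calculator", "nmu_detector"]
  let statuses := core_components.map (fun name =>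
    normalize_health_status (PySem.Dict.getD (PySem.Dict.mk (PySem.Dict.getD (PySem.Dict.mk normalized_services) name [])) "status" "degraded"))
  if statuses.any (fun status => status = "unhealthy") then "unhealthy"
  else if statuses.any (fun status => status = "degraded") then "degraded"
  else "healthy"

-- ===== PORT B =====
def pvSeverity (status : String) : Int :=
  if status = "unhealthy" then 2 else if status = "degraded" then 1 else 0

def derive_public_health_status_py_alt (normalized_services : List (String × List (String × String))) : String :=
  let worst := ["api", "external_api", "aqi_calculator", "nmu_detector"].foldl
    (fun worst name => max worst (pvSeverity (normalize_health_status
      (PySem.Dict.getD (PySem.Dict.mk (PySem.Dict.getD (PySem.Dict.mk normalized_services) name [])) "status" "degraded")))) 0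
  if worst = 2 then "unhealthy" else if worst = 1 then "degraded" else "healthy"

-- ===== PRECONDITION & SPEC =====
def Spec_derive_public_health_status_py (normalized_services : List (String × List (String × String))) (out : String) : Prop := out = derive_public_health_status_py_alt normalized_services
instance (normalized_services : List (String × List (String × String))) (out : String) : Decidable (Spec_derive_public_health_status_py normalized_services out) := by unfold Spec_derive_public_health_status_py; infer_instance

-- ===== CLAIM (what is proved, stated in full; the proofs are below) =====
def Claim_equal_derive_public_health_status_py : Prop := ∀ (normalized_services : List (String × List (String × String))), Dom_derive_public_health_status_py normalized_services → Spec_derive_public_health_status_py normalized_services (derive_public_health_status_py normalized_services)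

-- ===== LEMMAS AND PROOFS =====

-- the normalizer only ever yields one of the three canonical statuses
theorem normalize_cases (v : String) :
    normalize_health_status v = "healthy" ∨ normalize_health_status v = "degraded" ∨
    normalize_health_status v = "unhealthy" := by
  unfold normalize_health_status
  dsimp only
  split_ifs <;> simp

-- ===== VERDICT (by name: the statement is the Claim_ definition above) =====
theorem derive_public_health_status_py_spec : Claim_equal_derive_public_health_status_py := by
  intro ns _
  unfold Spec_derive_public_health_status_py derive_public_health_status_py derive_public_health_status_py_alt
  simp only [List.map, List.any, List.foldl]
  rcases normalize_cases (PySem.Dict.getD (PySem.Dict.mk (PySem.Dict.getD (PySem.Dict.mk ns) "api" [])) "status" "degraded") with h1 | h1 | h1 <;>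
  rcases normalize_cases (PySem.Dict.getD (PySem.Dict.mk (PySem.Dict.getD (PySem.Dict.mk ns) "external_api" [])) "status" "degraded") with h2 | h2 | h2 <;>
  rcases normalize_cases (PySem.Dict.getD (PySem.Dict.mk (PySem.Dict.getD (PySem.Dict.mk ns) "aqi_calculator" [])) "status" "degraded") with h3 | h3 | h3 <;>
  rcases normalize_cases (PySem.Dict.getD (PySem.Dict.mk (PySem.Dict.getD (PySem.Dict.mk ns) "nmu_detector" [])) "status" "degraded") with h4 | h4 | h4 <;>
  simp [h1, h2, h3, h4, pvSeverity]
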